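-- pv_equiv track=rewrite | github.com/mstockl9/ayed1-2025-tps | TP3/tp3ej2_matrizpatrones.py | entre_ceros
-- ===== SOURCE A (Python) =====
-- from typing import List
--
-- def entre_ceros(n: int) -> List[List[int]]:
--     """
--     Genera una matriz de N x N con un patrón que consiste en números desde el 1 hasta Nx2 separados por ceros
--     entre las filas de la matriz.
--
--     Pre: N debe ser un entero positivo.
--     Post: Retorna la matriz de N x N con el patrón descrito previamente.
--     """
--     matriz = [[] for fila in range(n)]
--     nro = 1
--     cero = True
--
--     for fila in matriz:
--         for x in range(n):
--             if cero:
--                 fila.append(0)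
--             else:
--                 fila.append(nro)
--                 nro += 1
--             cero = not cero
--         if not n%2:
--             cero = not cero
--
--     return matriz
-- ===== SOURCE B (Python) =====
-- from typing import List
--
-- def entre_ceros(n: int) -> List[List[int]]:
--     # Each cell is determined directly by its coordinates: zeros sit where
--     # r+c is even, and the sequential number at the other cells is
--     # (r*n + c)//2 + 1.  No running counter, no toggling flag, no even-n case.
--     return [[0 if (r + c) % 2 == 0 else (r * n + c) // 2 + 1
--              for c in range(n)]
--             for r in range(n)]
-- ===== Notes on version B (the rewrite author's own statement) =====
-- stated objective: simpler
-- what changed: Replaces the stateful double loop (running counter, toggling boolean, even-n extra toggle) by a closed-form per-cell formula: cell (r,c) is 0 when r+c is even and (r*n+c)//2+1 otherwise, built as a nested comprehension.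
import Mathlib
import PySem

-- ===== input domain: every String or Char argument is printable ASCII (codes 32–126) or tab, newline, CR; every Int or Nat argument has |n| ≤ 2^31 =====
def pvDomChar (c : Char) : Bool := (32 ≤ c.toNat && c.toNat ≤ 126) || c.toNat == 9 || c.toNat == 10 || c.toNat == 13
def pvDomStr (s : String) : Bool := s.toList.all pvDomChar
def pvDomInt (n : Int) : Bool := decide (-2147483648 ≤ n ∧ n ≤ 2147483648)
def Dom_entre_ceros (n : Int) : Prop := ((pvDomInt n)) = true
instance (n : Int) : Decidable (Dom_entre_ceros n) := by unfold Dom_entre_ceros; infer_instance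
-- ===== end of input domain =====

-- B replaces A's stateful double loop (counter + toggling flag + even-n extra toggle)
-- by a closed-form per-cell formula; objective: simpler.

-- ===== PORT A =====
-- literal port of A: a list of n empty rows, then a fold filling each row with a
-- running number `nro` and a toggling flag `cero`, with the extra toggle when n is even
def entre_ceros (n : Int) : List (List Int) :=
  (((PySem.List.pyRange 0 n 1).map (fun _ => ([] : List Int))).foldl
    (fun (st : List (List Int) × Int × Bool) (fila : List Int) =>
      let inner := (PySem.List.pyRange 0 n 1).foldl
        (fun (s : List Int × Int × Bool) _x =>
          if s.2.2 then (s.1 ++ [0], s.2.1, !s.2.2)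
          else (s.1 ++ [s.2.1], s.2.1 + 1, !s.2.2))
        (fila, st.2.1, st.2.2)
      let cero' := if PySem.Int.mod n 2 = 0 then !inner.2.2 else inner.2.2
      (st.1 ++ [inner.1], inner.2.1, cero'))
    ([], 1, true)).1

-- ===== PORT B =====
def entre_ceros_alt (n : Int) : List (List Int) :=
  (PySem.List.pyRange 0 n 1).map (fun r =>
    (PySem.List.pyRange 0 n 1).map (fun c =>
      if PySem.Int.mod (r + c) 2 = 0 then 0
      else PySem.Int.floordiv (r * n + c) 2 + 1))

-- ===== PRECONDITION & SPEC =====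
def Spec_entre_ceros (n : Int) (out : List (List Int)) : Prop := out = entre_ceros_alt n
instance (n : Int) (out : List (List Int)) : Decidable (Spec_entre_ceros n out) := by unfold Spec_entre_ceros; infer_instance

-- ===== CLAIM (what is proved, stated in full; the proofs are below) =====
def Claim_equal_entre_ceros : Prop := ∀ (n : Int), Dom_entre_ceros n → Spec_entre_ceros n (entre_ceros n)

-- ===== LEMMAS AND PROOFS =====

-- the value A's inner loop writes at column j when the row starts with counter nro and flag cero
def pvCell (nro : Int) (cero : Bool) (j : Nat) : Int :=
  if decide (j % 2 = 0) = cero then 0 else nro + (j / 2 : Nat)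

-- number of non-zero cells A's inner loop writes in k steps starting with flag cero
def pvCnt (cero : Bool) (k : Nat) : Int :=
  if cero then ((k / 2 : Nat) : Int) else (((k + 1) / 2 : Nat) : Int)

theorem pv_inner (f : List Int) (nro : Int) (cero : Bool) (l : List Int) :
    l.foldl
      (fun (s : List Int × Int × Bool) _x =>
        if s.2.2 then (s.1 ++ [0], s.2.1, !s.2.2)
        else (s.1 ++ [s.2.1], s.2.1 + 1, !s.2.2))
      (f, nro, cero)
    = (f ++ (List.range l.length).map (pvCell nro cero),
       nro + pvCnt cero l.length,
       xor cero (decide (l.length % 2 = 1))) := by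
  induction l using List.reverseRecOn with
  | nil => simp [pvCnt]
  | append_singleton l a ih =>
    rw [List.foldl_append, ih]
    rcases Nat.mod_two_eq_zero_or_one l.length with hk | hk <;> cases cero <;>
      simp [pvCell, pvCnt, hk, List.range_succ,
        Nat.succ_mod_two_eq_one_iff] <;>
      omega

theorem pv_outer (m : Nat) (n : Int) (hn : n = (m : Int)) (li : List Int)
    (hli : li.length = m) (r : Nat) :
    (List.replicate r ([] : List Int)).foldl
      (fun (st : List (List Int) × Int × Bool) (fila : List Int) =>
        (st.1 ++ [(li.foldl
            (fun (s : List Int × Int × Bool) _x =>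
              if s.2.2 then (s.1 ++ [0], s.2.1, !s.2.2)
              else (s.1 ++ [s.2.1], s.2.1 + 1, !s.2.2)) (fila, st.2.1, st.2.2)).1],
         (li.foldl
            (fun (s : List Int × Int × Bool) _x =>
              if s.2.2 then (s.1 ++ [0], s.2.1, !s.2.2)
              else (s.1 ++ [s.2.1], s.2.1 + 1, !s.2.2)) (fila, st.2.1, st.2.2)).2.1,
         if PySem.Int.mod n 2 = 0 then
           !(li.foldl
              (fun (s : List Int × Int × Bool) _x =>
                if s.2.2 then (s.1 ++ [0], s.2.1, !s.2.2)
                else (s.1 ++ [s.2.1], s.2.1 + 1, !s.2.2)) (fila, st.2.1, st.2.2)).2.2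
         else (li.foldl
              (fun (s : List Int × Int × Bool) _x =>
                if s.2.2 then (s.1 ++ [0], s.2.1, !s.2.2)
                else (s.1 ++ [s.2.1], s.2.1 + 1, !s.2.2)) (fila, st.2.1, st.2.2)).2.2))
      ([], 1, true)
    = ((List.range r).map (fun i =>
         (List.range m).map (pvCell (1 + ((i * m / 2 : Nat) : Int)) (decide (i % 2 = 0)))),
       1 + ((r * m / 2 : Nat) : Int),
       decide (r % 2 = 0)) := by
  subst hn
  induction r with
  | zero => simp
  | succ r ih =>
    rw [List.replicate_succ', List.foldl_append, List.foldl_cons, List.foldl_nil, ih,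
      pv_inner, hli]
    have hmul : (r * m) % 2 = r % 2 * (m % 2) % 2 := Nat.mul_mod r m 2
    have h3 : (r + 1) * m = r * m + m := by ring
    have hm2 : (((m : Int) % 2 = 0)) ↔ (m % 2 = 0) := by omega
    rw [PySem.Int.mod_eq_emod_of_pos (by norm_num)]
    refine Prod.ext ?_ (Prod.ext ?_ ?_)
    · simp [List.range_succ]
    · simp only [h3]
      generalize r * m = t at hmul ⊢
      rcases Nat.mod_two_eq_zero_or_one r with hr | hr <;>
        rw [hr] at hmul <;> simp [pvCnt, hr] <;> omega
    · rcases Nat.mod_two_eq_zero_or_one m with hm | hm <;>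
      rcases Nat.mod_two_eq_zero_or_one r with hr | hr <;>
        simp [hm2, hm, hr, Nat.add_mod]

-- per-cell agreement of A's written value with B's closed formula
theorem pv_cell_eq (m : Nat) (r c : Nat) :
    pvCell (1 + ((r * m / 2 : Nat) : Int)) (decide (r % 2 = 0)) c
    = (if PySem.Int.mod ((r : Int) + (c : Int)) 2 = 0 then 0
       else PySem.Int.floordiv ((r : Int) * (m : Int) + (c : Int)) 2 + 1) := by
  have hmul : (r * m) % 2 = r % 2 * (m % 2) % 2 := Nat.mul_mod r m 2
  have hcast : (r : Int) * (m : Int) = ((r * m : Nat) : Int) := by push_cast; ring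
  rw [PySem.Int.mod_eq_emod_of_pos (by norm_num),
    PySem.Int.floordiv_eq_ediv_of_pos (by norm_num), hcast]
  simp only [pvCell]
  generalize r * m = t at hmul ⊢
  rcases Nat.mod_two_eq_zero_or_one r with h | h <;>
  rcases Nat.mod_two_eq_zero_or_one c with h' | h' <;>
  rcases Nat.mod_two_eq_zero_or_one m with h'' | h'' <;>
    rw [h, h''] at hmul <;> simp [h, h'] <;> omega

theorem pv_main (n : Int) : entre_ceros n = entre_ceros_alt n := by
  by_cases hpos : 0 < n
  case neg =>
    have h0 : n.toNat = 0 := by omega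
    simp [entre_ceros, entre_ceros_alt, PySem.List.pyRange_one, h0]
  case pos =>
    have hnn : n = (n.toNat : Int) := by omega
    have hrepl : (List.range n.toNat).map (fun _ => ([] : List Int))
        = List.replicate n.toNat ([] : List Int) := by
      induction n.toNat with
      | zero => simp
      | succ k ih => rw [List.range_succ, List.map_append, ih, List.replicate_succ']; simp
    simp only [entre_ceros, entre_ceros_alt, PySem.List.pyRange_one, Int.sub_zero, zero_add,
      List.map_map, Function.comp_def]
    rw [hrepl,
      pv_outer n.toNat n hnn ((List.range n.toNat).map (fun k : Nat => ((k : Int)))) (by simp)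
        n.toNat]
    dsimp only
    refine List.map_congr_left ?_
    intro r _
    refine List.map_congr_left ?_
    intro c _
    rw [hnn]
    exact pv_cell_eq n.toNat r c

-- ===== VERDICT (by name: the statement is the Claim_ definition above) =====
theorem entre_ceros_spec : Claim_equal_entre_ceros := by
  intro n _
  unfold Spec_entre_ceros
  exact pv_main n
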